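-- pv_equiv track=rewrite | github.com/Egon2k/aoc2022 | day01/day01.py | helper
-- ===== SOURCE A (Python) =====
-- def helper(data):
--     sum = 0
--     sumList = []
--     for line in data:
--         if line != "":
--             sum += int(line.strip())
--         else:
--             sumList.append(sum)
--             sum = 0
--     return sumList
-- ===== SOURCE B (Python) =====
-- def helper(data):
--     groups = []
--     current = []
--     for line in data:
--         if line != "":
--             current.append(int(line.strip()))
--         else:
--             groups.append(current)
--             current = []
--     return [sum(g) for g in groups]
-- ===== Notes on version B (the rewrite author's own statement) =====
-- stated objective: alternative
-- what changed: B separates partitioning from summation: one pass collects each blank-terminated group of parsed integers into a list of groups (dropping the trailing unterminated group), then a second pass sums each group, instead of A's single pass with a running integer accumulator.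
import Mathlib
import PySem

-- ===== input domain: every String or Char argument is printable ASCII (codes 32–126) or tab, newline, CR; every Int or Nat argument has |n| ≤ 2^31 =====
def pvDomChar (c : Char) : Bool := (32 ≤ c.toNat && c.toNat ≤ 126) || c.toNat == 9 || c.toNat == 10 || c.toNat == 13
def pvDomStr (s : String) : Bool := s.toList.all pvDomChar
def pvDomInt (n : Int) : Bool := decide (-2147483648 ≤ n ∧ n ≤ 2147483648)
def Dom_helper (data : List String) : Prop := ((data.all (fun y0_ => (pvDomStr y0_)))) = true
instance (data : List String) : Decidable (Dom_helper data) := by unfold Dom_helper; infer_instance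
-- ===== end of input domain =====

-- B separates partitioning (collect each blank-terminated group of parsed integers,
-- dropping the trailing unterminated group) from summation (sum each group);
-- A keeps a single running integer accumulator. Objective: alternative decomposition.

-- value of int(line.strip()); under Pre_ the parse always succeeds, so getD 0 is unreachable
def pvVal (line : String) : Int := (PySem.Int.ofStr? (PySem.Str.strip line)).getD 0

-- ===== PORT A =====
def helper (data : List String) : List Int :=
  (data.foldl (fun (st : Int × List Int) line =>
    if line ≠ "" then (st.1 + pvVal line, st.2)
    else (0, st.2 ++ [st.1])) (0, [])).2

-- ===== PORT B =====
def pvSumGroup (g : List Int) : Int :=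
  g.foldl (fun acc x => acc + x) 0

def helper_alt (data : List String) : List Int :=
  let st := data.foldl (fun (st : List (List Int) × List Int) line =>
    if line ≠ "" then (st.1, st.2 ++ [pvVal line])
    else (st.1 ++ [st.2], [])) ([], [])
  st.1.map pvSumGroup

-- ===== PRECONDITION & SPEC =====
-- Pre_ excludes exactly the inputs on which int(line.strip()) raises ValueError (a non-blank
-- line that is not an integer literal); both A and B raise there. int() itself ignores
-- surrounding whitespace, so ofStr? line succeeds iff ofStr? (strip line) does.
def Pre_helper (data : List String) : Prop :=
  data.all (fun line => line.isEmpty || (PySem.Int.ofStr? line).isSome) = true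
instance (data : List String) : Decidable (Pre_helper data) := by unfold Pre_helper; infer_instance
def pvWitness_helper : List String := []
def Spec_helper (data : List String) (out : List Int) : Prop := out = helper_alt data
instance (data : List String) (out : List Int) : Decidable (Spec_helper data out) := by unfold Spec_helper; infer_instance

-- ===== CLAIM (what is proved, stated in full; the proofs are below) =====
def Claim_equal_helper : Prop := ∀ (data : List String), Dom_helper data → Pre_helper data → Spec_helper data (helper data)

-- ===== LEMMAS AND PROOFS =====

-- loop invariant: A's running sum is the sum of B's current group, and A's output
-- list is the image under pvSumGroup of B's collected groups
lemma helper_loop (data : List String) :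
    ∀ (groups : List (List Int)) (cur : List Int),
    (data.foldl (fun (st : Int × List Int) line =>
        if line ≠ "" then (st.1 + pvVal line, st.2)
        else (0, st.2 ++ [st.1])) (pvSumGroup cur, groups.map pvSumGroup)).2
    = ((data.foldl (fun (st : List (List Int) × List Int) line =>
        if line ≠ "" then (st.1, st.2 ++ [pvVal line])
        else (st.1 ++ [st.2], [])) (groups, cur)).1).map pvSumGroup := by
  induction data with
  | nil => intro groups cur; simp
  | cons line rest ih =>
    intro groups cur
    by_cases h : line = ""
    · subst h
      simpa using ih (groups ++ [cur]) []
    · have hs : pvSumGroup cur + pvVal line = pvSumGroup (cur ++ [pvVal line]) := by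
        simp [pvSumGroup, List.foldl_append]
      simpa [h, hs] using ih groups (cur ++ [pvVal line])

-- ===== VERDICT (by name: the statement is the Claim_ definition above) =====
theorem helper_spec : Claim_equal_helper := by
  intro data _ _
  unfold Spec_helper helper helper_alt
  simpa [pvSumGroup] using helper_loop data [] []
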